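-- pv_equiv track=rewrite | github.com/jenleap/datastructuresnd-project1 | Task4.py | check_telemarketer
-- ===== SOURCE A (Python) =====
-- def check_telemarketer(call_list, text_list):
--     call_senders = list()
--     call_receivers = list()
--     text_senders = list()
--     text_receivers = list()
--     possible_telemarketers = set()
--
--     for line in call_list:
--         call_senders.append(line[0])
--         call_receivers.append(line[1])
--
--     for tline in text_list:
--         text_senders.append(tline[0])
--         text_receivers.append(tline[1])
--
--     for sender in call_senders:
--         if sender not in call_receivers and sender not in text_senders and sender not in text_receivers:
--             possible_telemarketers.add(sender)
--
--     possible_telemarketers_list = list(possible_telemarketers)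
--     possible_telemarketers_list.sort()
--     return possible_telemarketers_list
-- ===== SOURCE B (Python) =====
-- def check_telemarketer(call_list, text_list):
--     # One-pass marking: a dict maps each number seen to True iff it is (so far)
--     # a pure caller; any appearance as call receiver or text participant
--     # permanently marks it False (setdefault never resurrects it).
--     status = {}
--     for s, r in call_list:
--         status.setdefault(s, True)
--         status[r] = False
--     for s, r in text_list:
--         status[s] = False
--         status[r] = False
--     return sorted(n for n, ok in status.items() if ok)
-- ===== Notes on version B (the rewrite author's own statement) =====
-- stated objective: alternative
-- what changed: Replaces the four accumulator lists and the per-sender triple-membership scan by a single status dictionary built in one marking pass (setdefault keeps a caller True, any contact overwrites to False), then sorts the keys still marked True.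
import Mathlib
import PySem

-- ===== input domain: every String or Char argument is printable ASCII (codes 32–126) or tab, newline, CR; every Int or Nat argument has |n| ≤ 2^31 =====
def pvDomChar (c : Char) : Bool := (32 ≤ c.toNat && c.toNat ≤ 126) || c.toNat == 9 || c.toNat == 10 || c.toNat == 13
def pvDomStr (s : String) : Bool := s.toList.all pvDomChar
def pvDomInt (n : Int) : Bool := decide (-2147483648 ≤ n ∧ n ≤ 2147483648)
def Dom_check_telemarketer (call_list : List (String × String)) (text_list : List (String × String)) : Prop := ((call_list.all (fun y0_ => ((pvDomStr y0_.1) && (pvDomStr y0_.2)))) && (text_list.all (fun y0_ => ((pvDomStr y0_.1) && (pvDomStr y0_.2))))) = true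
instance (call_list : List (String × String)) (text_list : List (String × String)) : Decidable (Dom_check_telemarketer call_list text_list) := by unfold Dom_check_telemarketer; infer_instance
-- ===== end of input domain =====

-- B replaces the per-sender triple-membership scan over accumulator lists by a one-pass
-- status dictionary (setdefault keeps a caller true, any contact overwrites to false),
-- then sorts the keys still marked true: an alternative marking algorithm.


-- ===== PORT A =====
def check_telemarketer (call_list : List (String × String)) (text_list : List (String × String)) : List String :=
  let call_senders := call_list.foldl (fun acc line => acc ++ [line.1]) []
  let call_receivers := call_list.foldl (fun acc line => acc ++ [line.2]) []
  let text_senders := text_list.foldl (fun acc tline => acc ++ [tline.1]) []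
  let text_receivers := text_list.foldl (fun acc tline => acc ++ [tline.2]) []
  let possible_telemarketers : PySem.Set String :=
    call_senders.foldl (fun s sender =>
      if !(call_receivers.contains sender) && !(text_senders.contains sender)
          && !(text_receivers.contains sender)
      then PySem.Set.add s sender else s) PySem.Set.empty
  PySem.List.sorted possible_telemarketers (fun x => x) false

-- ===== PORT B =====
def check_telemarketer_alt (call_list : List (String × String)) (text_list : List (String × String)) : List String :=
  let status0 : PySem.Dict String Bool :=
    call_list.foldl (fun d p => (d.setdefault p.1 true).insert p.2 false) PySem.Dict.empty
  let status : PySem.Dict String Bool :=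
    text_list.foldl (fun d p => (d.insert p.1 false).insert p.2 false) status0
  PySem.List.sorted ((status.items.filter (fun p => p.2)).map (fun p => p.1)) (fun x => x) false

-- ===== PRECONDITION & SPEC =====
def Spec_check_telemarketer (call_list : List (String × String)) (text_list : List (String × String)) (out : List String) : Prop := out = check_telemarketer_alt call_list text_list
instance (call_list : List (String × String)) (text_list : List (String × String)) (out : List String) : Decidable (Spec_check_telemarketer call_list text_list out) := by unfold Spec_check_telemarketer; infer_instance

-- ===== CLAIM (what is proved, stated in full; the proofs are below) =====
def Claim_equal_check_telemarketer : Prop := ∀ (call_list : List (String × String)) (text_list : List (String × String)), Dom_check_telemarketer call_list text_list → Spec_check_telemarketer call_list text_list (check_telemarketer call_list text_list)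

-- ===== LEMMAS AND PROOFS =====

-- A's conditional-add loop builds the set of the elements passing the filter.
theorem foldl_cond_add {α : Type} [BEq α] [LawfulBEq α] (p : α → Bool) :
    ∀ (l : List α) (s : PySem.Set α),
      l.foldl (fun s x => if p x then PySem.Set.add s x else s) s
        = PySem.Set.update s (l.filter p) := by
  intro l
  induction l with
  | nil => intro s; simp [PySem.Set.update]
  | cons x t ih =>
    intro s
    by_cases h : p x = true
    · simp [List.foldl_cons, h, ih, PySem.Set.update_cons]
    · simp [List.foldl_cons, h, ih]

-- Characterisation of the call-marking loop: a receiver is stuck at false,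
-- otherwise an existing entry keeps its value, otherwise a sender becomes true.
theorem callFold_get? :
    ∀ (cl : List (String × String)) (d : PySem.Dict String Bool) (n : String),
      (cl.foldl (fun d p => (d.setdefault p.1 true).insert p.2 false) d).get? n =
        if n ∈ cl.map Prod.snd then some false
        else match d.get? n with
          | some b => some b
          | none => if n ∈ cl.map Prod.fst then some true else none := by
  intro cl
  induction cl with
  | nil => intro d n; cases h : d.get? n <;> simp [h]
  | cons hd t ih =>
    intro d n
    rw [List.foldl_cons, ih]
    simp only [List.map_cons, List.mem_cons]
    by_cases hr : n ∈ t.map Prod.snd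
    · simp [hr]
    · by_cases h2 : n = hd.2
      · rw [if_neg hr, if_pos (Or.inl h2), h2, PySem.Dict.get?_insert_self]
      · rw [if_neg hr, if_neg (show ¬(n = hd.2 ∨ n ∈ List.map Prod.snd t) from by tauto)]
        have hgd1 : ((d.setdefault hd.1 true).insert hd.2 false).get? n
            = (d.setdefault hd.1 true).get? n := by
          rw [PySem.Dict.get?_insert]; simp [h2]
        rw [hgd1]
        by_cases h1 : n = hd.1
        · rw [h1, PySem.Dict.get?_setdefault_self]
          cases hd0 : d.get? hd.1 <;> simp
        · rw [PySem.Dict.get?_setdefault_of_ne d true h1]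
          cases hd0 : d.get? n
          · by_cases hf : n ∈ List.map Prod.fst t <;> simp [hf, h1]
          · simp

-- Specialisation to the empty start dict B uses.
theorem callFold_get?_empty (cl : List (String × String)) (n : String) :
    (cl.foldl (fun d p => (d.setdefault p.1 true).insert p.2 false)
        (PySem.Dict.empty : PySem.Dict String Bool)).get? n =
      if n ∈ cl.map Prod.snd then some false
      else if n ∈ cl.map Prod.fst then some true else none := by
  rw [callFold_get?, PySem.Dict.get?_empty]

-- Characterisation of the text-marking loop: any participant is stuck at false.
theorem textFold_get? :
    ∀ (tl : List (String × String)) (d : PySem.Dict String Bool) (n : String),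
      (tl.foldl (fun d p => (d.insert p.1 false).insert p.2 false) d).get? n =
        if n ∈ tl.map Prod.fst ∨ n ∈ tl.map Prod.snd then some false
        else d.get? n := by
  intro tl
  induction tl with
  | nil => intro d n; simp
  | cons hd t ih =>
    intro d n
    rw [List.foldl_cons, ih]
    simp only [List.map_cons, List.mem_cons]
    by_cases ht : n ∈ t.map Prod.fst ∨ n ∈ t.map Prod.snd
    · rw [if_pos ht, if_pos (by tauto)]
    · rw [if_neg ht]
      rcases not_or.mp ht with ⟨ht1, ht2⟩
      by_cases h1 : n = hd.1 <;> by_cases h2 : n = hd.2 <;>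
        simp [PySem.Dict.get?_insert, h1, h2, ht1, ht2]

-- Keys stay Nodup through both marking loops.
theorem callFold_nodup :
    ∀ (cl : List (String × String)) (d : PySem.Dict String Bool),
      d.keys.Nodup →
      (cl.foldl (fun d p => (d.setdefault p.1 true).insert p.2 false) d).keys.Nodup := by
  intro cl
  induction cl with
  | nil => intro d h; exact h
  | cons hd t ih =>
    intro d h
    rw [List.foldl_cons]
    apply ih
    apply PySem.Dict.nodup_keys_insert
    by_cases hc : d.contains hd.1 = true
    · rw [PySem.Dict.setdefault_of_contains d true hc]; exact h
    · rw [PySem.Dict.setdefault_of_not_contains d true (by simpa using hc)]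
      exact PySem.Dict.nodup_keys_insert _ _ _ h

theorem textFold_nodup :
    ∀ (tl : List (String × String)) (d : PySem.Dict String Bool),
      d.keys.Nodup →
      (tl.foldl (fun d p => (d.insert p.1 false).insert p.2 false) d).keys.Nodup := by
  intro tl
  induction tl with
  | nil => intro d h; exact h
  | cons hd t ih =>
    intro d h
    rw [List.foldl_cons]
    exact ih _ (PySem.Dict.nodup_keys_insert _ _ _ (PySem.Dict.nodup_keys_insert _ _ _ h))

theorem check_telemarketer_eq (call_list text_list : List (String × String)) :
    check_telemarketer call_list text_list = check_telemarketer_alt call_list text_list := by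
  unfold check_telemarketer check_telemarketer_alt
  simp only [PySem.List.foldl_append_singleton_eq_map, foldl_cond_add]
  rw [PySem.Set.update_empty]
  set dfin := text_list.foldl (fun d p => (d.insert p.1 false).insert p.2 false)
      (call_list.foldl (fun d p => (d.setdefault p.1 true).insert p.2 false) PySem.Dict.empty)
    with hdfin
  have hnd : dfin.keys.Nodup :=
    textFold_nodup _ _ (callFold_nodup _ _ (by simp [PySem.Dict.keys_empty]))
  have hget : ∀ n, dfin.get? n = some true ↔
      (n ∈ call_list.map Prod.fst ∧ ¬ n ∈ call_list.map Prod.snd ∧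
       ¬ n ∈ text_list.map Prod.fst ∧ ¬ n ∈ text_list.map Prod.snd) := by
    intro n
    rw [hdfin, textFold_get?, callFold_get?_empty]
    split_ifs with ht hr hs
    · exact iff_of_false (by simp) (fun h => ht.elim (fun x => h.2.2.1 x) (fun x => h.2.2.2 x))
    · exact iff_of_false (by simp) (fun h => h.2.1 hr)
    · exact iff_of_true rfl ⟨hs, hr, (not_or.mp ht).1, (not_or.mp ht).2⟩
    · exact iff_of_false (by simp) (fun h => hs h.1)
  have hmemB : ∀ n, n ∈ (dfin.items.filter (fun p => p.2)).map (fun p => p.1) ↔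
      dfin.get? n = some true := by
    intro n
    constructor
    · intro h
      obtain ⟨p, hp, rfl⟩ := List.mem_map.mp h
      have hf := List.mem_filter.mp hp
      have hpv : p.2 = true := by simpa using hf.2
      have hmem : (p.1, true) ∈ dfin.items := by
        have := hf.1; cases p; simp_all
      exact PySem.Dict.get?_of_mem_items dfin hmem hnd
    · intro h
      have hmem : (n, true) ∈ dfin.items := PySem.Dict.mem_items_of_get?_eq_some dfin h
      exact List.mem_map.mpr ⟨(n, true), List.mem_filter.mpr ⟨hmem, by simp⟩, rfl⟩
  have hndB : ((dfin.items.filter (fun p => p.2)).map (fun p => p.1)).Nodup := by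
    have hsub : ((dfin.items.filter (fun p => p.2)).map (fun p => p.1)).Sublist
        (dfin.items.map (fun p => p.1)) := List.Sublist.map _ List.filter_sublist
    have hk : (dfin.items.map (fun p => p.1)).Nodup := by
      simpa [PySem.Dict.keys] using hnd
    exact hsub.nodup hk
  apply PySem.List.sorted_eq_sorted_of_perm _ _ _ (fun a b h => h)
  apply (List.perm_ext_iff_of_nodup (PySem.Set.nodup_ofList _) hndB).mpr
  intro y
  rw [hmemB, hget]
  simp only [PySem.Set.mem_ofList, List.mem_filter, Bool.and_eq_true, Bool.not_eq_true',
    List.contains_eq_mem, decide_eq_false_iff_not]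
  tauto

-- ===== VERDICT (by name: the statement is the Claim_ definition above) =====
theorem check_telemarketer_spec : Claim_equal_check_telemarketer := by
  intro cl tl _
  exact check_telemarketer_eq cl tl
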